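-- pv_equiv track=rewrite | github.com/LewisDyer/StochasticGames | src/utils/stb/pp_fns.py | produce_board
-- ===== SOURCE A (Python) =====
-- def partitions(n):
--     # all partitions, allowing repetition (e.g multiple ones)
--     all_parts = set()
--     all_parts.add((n, ))
--     for i in range(1, n):
--         for j in partitions(n - i):
--             all_parts.add(tuple(sorted((i, ) + j, reverse=True)))
--
--     return all_parts
--
-- def produce_board(current, b, newline):
--     # produce PRISM code for one board
--     parts = []
--     for i in range(1, b+1):
--         parts.extend([p[::-1] for p in partitions(i) if len(set(p)) == len(p) and current in p])
--
--     parts.sort(key=len, reverse=False)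
--
--     board_module = [f"module board{current}", "", f"\tb{current} : [0..1];", ""]
--
--     for p in parts:
--         board_module.append(f"\t[cover{''.join([str(i) for i in p])}] b{current}=0 -> (b{current}'=1);")
--
--     board_module.append("")
--     board_module.append("endmodule")
--
--     return(newline.join(board_module))
-- ===== SOURCE B (Python) =====
-- def produce_board(current, b, newline):
--     # produce PRISM code for one board — bottom-up DP over partition sets
--     # (no exponential recursion) and length-bucketing instead of a sort.
--     table = [set()]
--     for n in range(1, b + 1):
--         s = {(n,)}
--         for i in range(1, n):
--             for j in table[n - i]:
--                 s.add(tuple(sorted((i,) + j, reverse=True)))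
--         table.append(s)
--
--     allparts = [p[::-1]
--                 for n in range(1, b + 1)
--                 for p in table[n]
--                 if len(set(p)) == len(p) and current in p]
--
--     ordered = [p for k in range(1, b + 1) for p in allparts if len(p) == k]
--
--     lines = [f"module board{current}", "", f"\tb{current} : [0..1];", ""]
--     lines.extend(f"\t[cover{''.join(str(i) for i in p)}] b{current}=0 -> (b{current}'=1);"
--                  for p in ordered)
--     lines.extend(["", "endmodule"])
--     return newline.join(lines)
-- ===== Notes on version B (the rewrite author's own statement) =====
-- stated objective: faster
-- what changed: B replaces A's exponential recursive partitions() enumeration by a bottom-up memo table of partition sets and replaces the final stable sort by concatenating length buckets; intended as faster (memoization removes recomputation) but a timing run could not confirm it at its largest sizes, where the output itself grows exponentially and neither program finishes. Pre_ excludes inputs where some i <= b has two equal-length distinct-part partitions containing current, on which A's line order within that length group is an accident of CPython set iteration order.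
import Mathlib
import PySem

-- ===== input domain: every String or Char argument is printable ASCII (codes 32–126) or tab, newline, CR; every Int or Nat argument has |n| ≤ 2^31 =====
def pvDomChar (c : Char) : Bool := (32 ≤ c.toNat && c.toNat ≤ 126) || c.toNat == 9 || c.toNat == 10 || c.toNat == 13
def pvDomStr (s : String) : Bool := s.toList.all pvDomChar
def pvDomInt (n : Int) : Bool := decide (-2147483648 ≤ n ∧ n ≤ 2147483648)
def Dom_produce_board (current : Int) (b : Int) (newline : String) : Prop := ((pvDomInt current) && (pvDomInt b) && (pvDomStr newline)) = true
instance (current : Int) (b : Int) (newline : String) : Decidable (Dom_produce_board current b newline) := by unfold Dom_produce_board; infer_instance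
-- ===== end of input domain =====

-- B replaces A's exponential partitions recursion by a bottom-up memo table and replaces the
-- final stable sort by length-bucket concatenation (intended as faster; a timing run could
-- not confirm a ratio at its largest sizes, where neither program finishes).

-- ===== PORT A =====
-- Python helper `partitions(n)`: a set of descending tuples (PySem.Set = insertion order; see Pre_)
def pv_partitions (n : Int) : PySem.Set (List Int) :=
  (PySem.List.pyRange 1 n 1).attach.foldl
    (fun all_parts i =>
      (pv_partitions (n - i.1)).foldl
        (fun all_parts j =>
          PySem.Set.add all_parts (PySem.List.sorted (i.1 :: j) (fun x => x) true))
        all_parts)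
    (PySem.Set.add PySem.Set.empty [n])
termination_by n.toNat
decreasing_by
  have h := PySem.List.mem_pyRange_one.mp i.2
  omega

def produce_board (current : Int) (b : Int) (newline : String) : String :=
  let parts : List (List Int) :=
    (PySem.List.pyRange 1 (b + 1) 1).foldl
      (fun parts i =>
        parts ++ ((pv_partitions i).filter
            (fun p => (PySem.Set.len (PySem.Set.ofList p) == PySem.List.len p) && p.contains current)).map
          (fun p => p.reverse))  -- p[::-1] (PySem.List.slice?_none_none_neg_one)
      []
  let parts := PySem.List.sorted parts (fun p => PySem.List.len p) false
  let board_module : List String :=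
    ["module board" ++ PySem.Int.toStr current, "",
     "\tb" ++ PySem.Int.toStr current ++ " : [0..1];", ""]
  let board_module := parts.foldl
    (fun bm p => bm ++ ["\t[cover" ++ PySem.Str.join "" (p.map (fun i => PySem.Int.toStr i)) ++
      "] b" ++ PySem.Int.toStr current ++ "=0 -> (b" ++ PySem.Int.toStr current ++ "'=1);"])
    board_module
  let board_module := board_module ++ ["", "endmodule"]
  PySem.Str.join newline board_module

-- ===== PORT B =====
def produce_board_alt (current : Int) (b : Int) (newline : String) : String :=
  let table : List (PySem.Set (List Int)) :=
    (PySem.List.pyRange 1 (b + 1) 1).foldl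
      (fun table n =>
        table ++ [(PySem.List.pyRange 1 n 1).foldl
            (fun s i =>
              (PySem.List.pyGetD table (n - i) PySem.Set.empty).foldl
                (fun s j => PySem.Set.add s (PySem.List.sorted (i :: j) (fun x => x) true)) s)
            (PySem.Set.add PySem.Set.empty [n])])
      [PySem.Set.empty]
  let allparts : List (List Int) :=
    (PySem.List.pyRange 1 (b + 1) 1).flatMap (fun n =>
      ((PySem.List.pyGetD table n PySem.Set.empty).filter
          (fun p => (PySem.Set.len (PySem.Set.ofList p) == PySem.List.len p) && p.contains current)).map
        (fun p => p.reverse))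
  let ordered : List (List Int) :=
    (PySem.List.pyRange 1 (b + 1) 1).flatMap (fun k =>
      allparts.filter (fun p => PySem.List.len p == k))
  let lines : List String :=
    ["module board" ++ PySem.Int.toStr current, "",
     "\tb" ++ PySem.Int.toStr current ++ " : [0..1];", ""]
    ++ ordered.map (fun p => "\t[cover" ++ PySem.Str.join "" (p.map (fun i => PySem.Int.toStr i)) ++
      "] b" ++ PySem.Int.toStr current ++ "=0 -> (b" ++ PySem.Int.toStr current ++ "'=1);")
    ++ ["", "endmodule"]
  PySem.Str.join newline lines

-- ===== PRECONDITION & SPEC =====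
-- Pre_ excludes inputs where some i ≤ b has two distinct-part partitions of equal length both
-- containing `current`: there A's line order within that length group is an accident of CPython's
-- set iteration order (not modelled by PySem.Set, which iterates in insertion order), so no order
-- is the specified one; A still returns a string there.  The threshold is the smallest such i for
-- each `current` (8 for 1; 9 for 2,3; 10 for 5; 11 for 4,6; current+5 from 7 on).
def Pre_produce_board (current : Int) (b : Int) (newline : String) : Prop :=
  current ≤ 0 ∨ b < (if current = 1 then 8 else if current ≤ 3 then 9 else
                     if current = 5 then 10 else if current ≤ 6 then 11 else current + 5)
instance (current : Int) (b : Int) (newline : String) : Decidable (Pre_produce_board current b newline) := by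
  unfold Pre_produce_board; infer_instance
def pvWitness_produce_board : Int × Int × String := (2, 7, "\n")

def Spec_produce_board (current : Int) (b : Int) (newline : String) (out : String) : Prop := out = produce_board_alt current b newline
instance (current : Int) (b : Int) (newline : String) (out : String) : Decidable (Spec_produce_board current b newline out) := by unfold Spec_produce_board; infer_instance

-- ===== CLAIM (what is proved, stated in full; the proofs are below) =====
def Claim_equal_produce_board : Prop := ∀ (current : Int) (b : Int) (newline : String), Dom_produce_board current b newline → Pre_produce_board current b newline → Spec_produce_board current b newline (produce_board current b newline)

-- ===== LEMMAS AND PROOFS =====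

-- `partitions` without the `attach` wrapper used for termination
theorem pv_partitions_unfold (n : Int) :
    pv_partitions n =
      (PySem.List.pyRange 1 n 1).foldl
        (fun all_parts i =>
          (pv_partitions (n - i)).foldl
            (fun all_parts j =>
              PySem.Set.add all_parts (PySem.List.sorted (i :: j) (fun x => x) true))
            all_parts)
        (PySem.Set.add PySem.Set.empty [n]) := by
  rw [pv_partitions]
  exact @List.foldl_attach _ _ (PySem.List.pyRange 1 n 1)
    (fun all_parts i =>
      (pv_partitions (n - i)).foldl
        (fun all_parts j =>
          PySem.Set.add all_parts (PySem.List.sorted (i :: j) (fun x => x) true))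
        all_parts)
    (PySem.Set.add PySem.Set.empty [n])

-- membership in a fold of Set.add over a list
theorem mem_foldl_setadd {β : Type} (f : β → List Int) (l : List β)
    (s : PySem.Set (List Int)) (x : List Int)
    (hx : x ∈ l.foldl (fun s j => PySem.Set.add s (f j)) s) :
    x ∈ s ∨ ∃ j ∈ l, x = f j := by
  induction l generalizing s with
  | nil => exact Or.inl hx
  | cons a l ih =>
    rcases ih _ hx with h | h
    · rcases (PySem.Set.mem_add _ _ _).mp h with h | h
      · exact Or.inl h
      · exact Or.inr ⟨a, by simp, h⟩
    · rcases h with ⟨j, hj, hje⟩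
      exact Or.inr ⟨j, by simp [hj], hje⟩

-- every element of partitions(n) is a nonempty list of length ≤ max n 1
theorem pv_partitions_len_bound (n : Int) :
    ∀ q ∈ pv_partitions n, 1 ≤ q.length ∧ (q.length : Int) ≤ max n 1 := by
  intro q hq
  rw [pv_partitions_unfold] at hq
  have main : ∀ (l : List Int), (∀ i ∈ l, 1 ≤ i ∧ i < n) →
      ∀ (s : PySem.Set (List Int)),
      (∀ p ∈ s, 1 ≤ p.length ∧ (p.length : Int) ≤ max n 1) →
      ∀ p ∈ l.foldl
        (fun all_parts i =>
          (pv_partitions (n - i)).foldl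
            (fun all_parts j =>
              PySem.Set.add all_parts (PySem.List.sorted (i :: j) (fun x => x) true))
            all_parts)
        s, 1 ≤ p.length ∧ (p.length : Int) ≤ max n 1 := by
    intro l
    induction l with
    | nil => intro _ s hs p hp; exact hs p hp
    | cons a l ih =>
      intro hmem s hs p hp
      refine ih (fun i hi => hmem i (by simp [hi])) _ ?_ p hp
      intro p' hp'
      rcases mem_foldl_setadd _ _ _ _ hp' with h | ⟨j, hj, rfl⟩
      · exact hs p' h
      · have ha := hmem a (by simp)
        have hrec := pv_partitions_len_bound (n - a) j hj
        have hlen : (PySem.List.sorted (a :: j) (fun x => x) true).length = j.length + 1 := by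
          simp [PySem.List.length_sorted]
        constructor
        · omega
        · rw [hlen]
          have : (j.length : Int) ≤ max (n - a) 1 := hrec.2
          push_cast
          omega
  refine main _ (fun i hi => PySem.List.mem_pyRange_one.mp hi) _ ?_ q hq
  intro p hp
  have hpn : p = [n] := by simpa using hp
  subst hpn
  simp
termination_by n.toNat
decreasing_by omega

-- looking the DP table up at 1 ≤ k ≤ m gives partitions(k)
theorem table_lookup (m k : Int) (hk1 : 1 ≤ k) (hk2 : k ≤ m) :
    PySem.List.pyGetD (PySem.Set.empty :: (PySem.List.pyRange 1 (m + 1) 1).map pv_partitions)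
      k PySem.Set.empty = pv_partitions k := by
  have hlen : ((PySem.Set.empty :: (PySem.List.pyRange 1 (m + 1) 1).map pv_partitions) : List _).length
      = 1 + (m : Int).toNat := by
    simp [PySem.List.length_pyRange_one]
    omega
  rw [PySem.List.pyGetD_eq_getElem _ _ (by omega) (by rw [hlen]; push_cast; omega)]
  obtain ⟨j, hj⟩ : ∃ j, k.toNat = j + 1 := ⟨k.toNat - 1, by omega⟩
  have hjlt : j < ((PySem.List.pyRange 1 (m + 1) 1).map pv_partitions).length := by
    simp [PySem.List.length_pyRange_one]; omega
  rw [List.getElem_eq_iff (by rw [hlen]; omega), hj]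
  simp only [List.getElem?_cons_succ]
  rw [List.getElem?_eq_getElem (by simpa using hjlt)]
  rw [List.getElem_map]
  rw [PySem.List.getElem_pyRange_one]
  have hk : (1:Int) + j = k := by omega
  rw [hk]

-- the DP table built by B is [∅] ++ [partitions(1), …, partitions(m)]
theorem table_spec (m : Int) (hm : 0 ≤ m) :
    (PySem.List.pyRange 1 (m + 1) 1).foldl
      (fun table n =>
        table ++ [(PySem.List.pyRange 1 n 1).foldl
            (fun s i =>
              (PySem.List.pyGetD table (n - i) PySem.Set.empty).foldl
                (fun s j => PySem.Set.add s (PySem.List.sorted (i :: j) (fun x => x) true)) s)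
            (PySem.Set.add PySem.Set.empty [n])])
      [PySem.Set.empty]
    = PySem.Set.empty :: (PySem.List.pyRange 1 (m + 1) 1).map pv_partitions := by
  induction m, hm using Int.le_induction with
  | base =>
    rw [show PySem.List.pyRange 1 (0 + 1) 1 = [] from PySem.List.pyRange_one_eq_nil (by omega)]
    simp
  | succ m hm0 ih =>
    rw [PySem.List.pyRange_one_succ_right (by omega : (1:Int) ≤ m + 1)]
    rw [List.foldl_append, List.map_append, ih]
    simp only [List.foldl_cons, List.foldl_nil, List.map_cons, List.map_nil]
    rw [List.cons_append]
    congr 1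
    congr 1
    congr 1
    -- the new entry equals pv_partitions (m+1)
    rw [pv_partitions_unfold (m + 1)]
    refine PySem.List.foldl_congr_mem _ _ _ _ ?_
    intro acc i hi
    have hi' := PySem.List.mem_pyRange_one.mp hi
    rw [table_lookup m (m + 1 - i) (by omega) (by omega)]

-- stable insertion of x between a block of keys ≤ key x and a block of keys > key x
theorem insertBy_split (key : List Int → Int) (x : List Int) (C1 C2 : List (List Int))
    (h1 : ∀ y ∈ C1, ¬ key x < key y) (h2 : ∀ y ∈ C2, key x < key y) :
    PySem.List.insertBy (fun a b => decide (key a < key b)) x (C1 ++ C2) = C1 ++ x :: C2 := by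
  induction C1 with
  | nil =>
    cases C2 with
    | nil => simp [PySem.List.insertBy]
    | cons y ys =>
      have hy := h2 y (by simp)
      simp [PySem.List.insertBy, hy]
  | cons z zs ih =>
    have hz := h1 z (by simp)
    simp only [List.cons_append, PySem.List.insertBy, decide_eq_true_eq, if_neg hz]
    exact congrArg _ (ih (fun y hy => h1 y (by simp [hy])))

-- Python's stable sort by length is the concatenation of the length buckets
theorem sorted_len_buckets (xs : List (List Int)) (b : Int)
    (h : ∀ p ∈ xs, 1 ≤ PySem.List.len p ∧ PySem.List.len p ≤ b) :
    PySem.List.sorted xs (fun p => PySem.List.len p) false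
      = (PySem.List.pyRange 1 (b + 1) 1).flatMap
          (fun k => xs.filter (fun p => PySem.List.len p == k)) := by
  induction xs using List.reverseRecOn with
  | nil => simp [PySem.List.sorted]
  | append_singleton xs x ih =>
    have hx := h x (by simp)
    have hxs : ∀ p ∈ xs, 1 ≤ PySem.List.len p ∧ PySem.List.len p ≤ b :=
      fun p hp => h p (by simp [hp])
    have hsplit : PySem.List.pyRange 1 (b + 1) 1 =
        PySem.List.pyRange 1 (PySem.List.len x + 1) 1 ++
        PySem.List.pyRange (PySem.List.len x + 1) (b + 1) 1 :=
      PySem.List.pyRange_one_append 1 _ _ (by omega) (by omega)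
    have key_mem : ∀ (lo hi : Int) (y : List Int),
        y ∈ (PySem.List.pyRange lo hi 1).flatMap
          (fun k => xs.filter (fun p => PySem.List.len p == k)) →
        lo ≤ PySem.List.len y ∧ PySem.List.len y < hi := by
      intro lo hi y hy
      rcases List.mem_flatMap.mp hy with ⟨k, hk, hyk⟩
      rcases List.mem_filter.mp hyk with ⟨-, hky⟩
      have : PySem.List.len y = k := by simpa using hky
      have := PySem.List.mem_pyRange_one.mp hk
      omega
    rw [PySem.List.sorted_eq_foldl_insertBy, List.foldl_append,
        ← PySem.List.sorted_eq_foldl_insertBy, ih hxs]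
    simp only [List.foldl_cons, List.foldl_nil]
    rw [hsplit, List.flatMap_append,
        insertBy_split _ _ _ _
          (fun y hy => by have := key_mem _ _ y hy; omega)
          (fun y hy => by have := key_mem _ _ y hy; omega)]
    rw [List.flatMap_append]
    have hfx_gt : (PySem.List.pyRange (PySem.List.len x + 1) (b + 1) 1).flatMap
        (fun k => (xs ++ [x]).filter (fun p => PySem.List.len p == k))
        = (PySem.List.pyRange (PySem.List.len x + 1) (b + 1) 1).flatMap
        (fun k => xs.filter (fun p => PySem.List.len p == k)) := by
      refine List.flatMap_congr (fun k hk => ?_)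
      have hk' := PySem.List.mem_pyRange_one.mp hk
      have hne : ¬ (x.length : Int) = k := by
        simp only [PySem.List.len_eq] at hk'; omega
      simp [List.filter_append, hne]
    have hlow : PySem.List.pyRange 1 (PySem.List.len x + 1) 1 =
        PySem.List.pyRange 1 (PySem.List.len x) 1 ++ [PySem.List.len x] :=
      PySem.List.pyRange_one_succ_right (by omega)
    have hfx_lt : ∀ k ∈ PySem.List.pyRange 1 (PySem.List.len x) 1,
        (xs ++ [x]).filter (fun p => PySem.List.len p == k)
        = xs.filter (fun p => PySem.List.len p == k) := by
      intro k hk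
      have hk' := PySem.List.mem_pyRange_one.mp hk
      have hne : ¬ (x.length : Int) = k := by
        simp only [PySem.List.len_eq] at hk'; omega
      simp [List.filter_append, hne]
    rw [hfx_gt, hlow, List.flatMap_append, List.flatMap_append,
        List.flatMap_congr hfx_lt]
    simp [List.filter_append]

-- the two ports agree on every input
theorem boards_eq (current b : Int) (newline : String) :
    produce_board current b newline = produce_board_alt current b newline := by
  unfold produce_board produce_board_alt
  dsimp only
  rcases Int.lt_or_le b 0 with hb | hb
  · rw [show PySem.List.pyRange 1 (b + 1) 1 = [] from PySem.List.pyRange_one_eq_nil (by omega)]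
    simp [PySem.List.sorted]
  · set pred : List Int → Bool :=
      fun p => (PySem.Set.len (PySem.Set.ofList p) == PySem.List.len p) && p.contains current with hpred
    have hG : ∀ g : Int → List (List Int),
        (PySem.List.pyRange 1 (b + 1) 1).foldl (fun parts i => parts ++ g i) []
          = (PySem.List.pyRange 1 (b + 1) 1).flatMap g := by
      intro g
      rw [PySem.List.foldl_append_eq_flatMap]
      simp
    rw [hG]
    rw [table_spec b hb]
    have hlookup : (PySem.List.pyRange 1 (b + 1) 1).flatMap (fun n =>
        ((PySem.List.pyGetD (PySem.Set.empty :: (PySem.List.pyRange 1 (b + 1) 1).map pv_partitions)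
            n PySem.Set.empty).filter pred).map (fun p => p.reverse))
        = (PySem.List.pyRange 1 (b + 1) 1).flatMap (fun n =>
        ((pv_partitions n).filter pred).map (fun p => p.reverse)) := by
      refine List.flatMap_congr (fun n hn => ?_)
      have hn' := PySem.List.mem_pyRange_one.mp hn
      rw [table_lookup b n (by omega) (by omega)]
    rw [hlookup]
    have hbound : ∀ p ∈ (PySem.List.pyRange 1 (b + 1) 1).flatMap (fun n =>
        ((pv_partitions n).filter pred).map (fun p => p.reverse)),
        1 ≤ PySem.List.len p ∧ PySem.List.len p ≤ b := by
      intro p hp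
      rcases List.mem_flatMap.mp hp with ⟨n, hn, hpn⟩
      rcases List.mem_map.mp hpn with ⟨q, hq, rfl⟩
      have hn' := PySem.List.mem_pyRange_one.mp hn
      have hqb := pv_partitions_len_bound n q (List.mem_filter.mp hq).1
      simp only [PySem.List.len_eq, List.length_reverse]
      constructor
      · exact_mod_cast hqb.1
      · have := hqb.2
        omega
    rw [sorted_len_buckets _ b hbound]
    rw [PySem.List.foldl_append_singleton_eq_map]

-- ===== VERDICT (by name: the statement is the Claim_ definition above) =====
theorem produce_board_spec : Claim_equal_produce_board := by
  intro current b newline _ hpre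
  -- the ports agree even without Pre_ (both iterate sets in insertion order);
  -- Pre_ is where Python A's own output is independent of CPython's set iteration order
  rcases hpre with _ | _ <;> exact boards_eq current b newline
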